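-- pv_equiv track=rewrite | github.com/shalit-lab/ML4H-Course-Projects-2020 | bias-in-medical-imaging-Gal-peretz/utils/data.py | get_extremes_points
-- ===== SOURCE A (Python) =====
-- def get_extremes_points(landmark):
--     x_min = x_max = y_min = y_max = None
--     left_most = right_most = top_most = bottom_most = None
--     for x, y in landmark:
--         if x_min is None:
--             x_min = x_max = x
--             y_min = y_max = y
--             left_most = right_most = top_most = bottom_most = (x, y)
--         else:
--             if x < x_min:
--                 left_most = (x, y)
--                 x_min = x
--             if y < y_min:
--                 top_most = (x, y)
--                 y_min = y
--             if x > x_max: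
--                 right_most = (x, y)
--                 x_max = x
--             if y > y_max:
--                 bottom_most = (x, y)
--                 y_max = y
--     return left_most, right_most, top_most, bottom_most
-- ===== SOURCE B (Python) =====
-- def get_extremes_points(landmark):
--     points = list(landmark)
--     if not points:
--         return None, None, None, None
--     left_most = min(points, key=lambda p: p[0])
--     right_most = max(points, key=lambda p: p[0])
--     top_most = min(points, key=lambda p: p[1])
--     bottom_most = max(points, key=lambda p: p[1])
--     return left_most, right_most, top_most, bottom_most
-- ===== Notes on version B (the rewrite author's own statement) =====
-- stated objective: idiomatic
-- what changed: Replaced the hand-rolled single loop tracking eight state variables with an empty guard plus four builtin min/max calls with coordinate keys (first extremal element reproduces A's strict-inequality tie-breaking).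
import Mathlib
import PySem

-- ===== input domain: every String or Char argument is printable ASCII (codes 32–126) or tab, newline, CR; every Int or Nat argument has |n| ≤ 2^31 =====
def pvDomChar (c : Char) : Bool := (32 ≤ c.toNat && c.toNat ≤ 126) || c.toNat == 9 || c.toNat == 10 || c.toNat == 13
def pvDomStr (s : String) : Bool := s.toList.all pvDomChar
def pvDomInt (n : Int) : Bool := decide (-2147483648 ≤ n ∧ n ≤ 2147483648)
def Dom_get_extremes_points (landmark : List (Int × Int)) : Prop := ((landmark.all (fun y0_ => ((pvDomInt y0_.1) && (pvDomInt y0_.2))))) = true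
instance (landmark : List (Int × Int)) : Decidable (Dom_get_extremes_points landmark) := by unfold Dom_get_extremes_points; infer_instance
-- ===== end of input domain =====

-- B replaces A's hand-rolled eight-variable loop by an empty guard plus four builtin min/max calls with coordinate keys (idiomatic).


-- ===== PORT A =====
-- loop state: (x_min, x_max, y_min, y_max, left_most, right_most, top_most, bottom_most)
def StA : Type := Option Int × Option Int × Option Int × Option Int ×
  Option (Int × Int) × Option (Int × Int) × Option (Int × Int) × Option (Int × Int)

def stepA (s : StA) (p : Int × Int) : StA :=
  match s with
  | (none, _, _, _, _, _, _, _) =>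
      (some p.1, some p.1, some p.2, some p.2, some p, some p, some p, some p)
  | (some xm, some xM, some ym, some yM, L, R, T, Bo) =>
      let LX := if p.1 < xm then (some p, p.1) else (L, xm)
      let TY := if p.2 < ym then (some p, p.2) else (T, ym)
      let RX := if xM < p.1 then (some p, p.1) else (R, xM)
      let BY := if yM < p.2 then (some p, p.2) else (Bo, yM)
      (some LX.2, some RX.2, some TY.2, some BY.2, LX.1, RX.1, TY.1, BY.1)
  | s => s  -- unreachable in Python: the four extrema are always set together

def get_extremes_points (landmark : List (Int × Int)) :
    (Option (Int × Int)) × (Option (Int × Int)) × (Option (Int × Int)) × (Option (Int × Int)) :=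
  match landmark.foldl stepA (none, none, none, none, none, none, none, none) with
  | (_, _, _, _, L, R, T, Bo) => (L, R, T, Bo)

-- ===== PORT B =====
def get_extremes_points_alt (landmark : List (Int × Int)) :
    (Option (Int × Int)) × (Option (Int × Int)) × (Option (Int × Int)) × (Option (Int × Int)) :=
  match landmark with
  | [] => (none, none, none, none)
  | _ => (PySem.List.min? landmark (fun p => p.1), PySem.List.max? landmark (fun p => p.1),
          PySem.List.min? landmark (fun p => p.2), PySem.List.max? landmark (fun p => p.2))

-- ===== PRECONDITION & SPEC =====
def Spec_get_extremes_points (landmark : List (Int × Int)) (out : (Option (Int × Int)) × (Option (Int × Int)) × (Option (Int × Int)) × (Option (Int × Int))) : Prop := out = get_extremes_points_alt landmark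
instance (landmark : List (Int × Int)) (out : (Option (Int × Int)) × (Option (Int × Int)) × (Option (Int × Int)) × (Option (Int × Int))) : Decidable (Spec_get_extremes_points landmark out) := by unfold Spec_get_extremes_points; infer_instance

-- ===== CLAIM (what is proved, stated in full; the proofs are below) =====
def Claim_equal_get_extremes_points : Prop := ∀ (landmark : List (Int × Int)), Dom_get_extremes_points landmark → Spec_get_extremes_points landmark (get_extremes_points landmark)

-- ===== LEMMAS AND PROOFS =====

-- the single steps of min?/max? with a key
def mstep (key : Int × Int → Int) (acc : Option (Int × Int)) (x : Int × Int) : Option (Int × Int) :=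
  match acc with
  | none => some x
  | some m => if key x < key m then some x else some m

def Mstep (key : Int × Int → Int) (acc : Option (Int × Int)) (x : Int × Int) : Option (Int × Int) :=
  match acc with
  | none => some x
  | some m => if key m < key x then some x else some m

theorem min?_eq_foldl (xs : List (Int × Int)) (key : Int × Int → Int) :
    PySem.List.min? xs key = xs.foldl (mstep key) none := by
  simp only [PySem.List.min?]; congr 1; funext acc x; cases acc <;> rfl

theorem max?_eq_foldl (xs : List (Int × Int)) (key : Int × Int → Int) :
    PySem.List.max? xs key = xs.foldl (Mstep key) none := by
  simp only [PySem.List.max?]; congr 1; funext acc x; cases acc <;> rfl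

-- invariant: from an all-some state, A's fold tracks the four min/max folds on the survivors
theorem fold_some (l : List (Int × Int)) :
    ∀ (a b c d : Int × Int),
    l.foldl stepA (some a.1, some b.1, some c.2, some d.2, some a, some b, some c, some d)
      = (((l.foldl (mstep (fun p => p.1)) (some a)).map (fun p => p.1)),
         ((l.foldl (Mstep (fun p => p.1)) (some b)).map (fun p => p.1)),
         ((l.foldl (mstep (fun p => p.2)) (some c)).map (fun p => p.2)),
         ((l.foldl (Mstep (fun p => p.2)) (some d)).map (fun p => p.2)),
         l.foldl (mstep (fun p => p.1)) (some a),
         l.foldl (Mstep (fun p => p.1)) (some b),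
         l.foldl (mstep (fun p => p.2)) (some c),
         l.foldl (Mstep (fun p => p.2)) (some d)) := by
  induction l with
  | nil => intro a b c d; rfl
  | cons p t ih =>
      intro a b c d
      simp only [List.foldl_cons]
      by_cases h1 : p.1 < a.1 <;> by_cases h2 : p.2 < c.2 <;>
        by_cases h3 : b.1 < p.1 <;> by_cases h4 : d.2 < p.2 <;>
        simp [stepA, mstep, Mstep, h1, h2, h3, h4, ih]

-- ===== VERDICT (by name: the statement is the Claim_ definition above) =====
theorem get_extremes_points_spec : Claim_equal_get_extremes_points := by
  intro landmark _
  unfold Spec_get_extremes_points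
  cases landmark with
  | nil => rfl
  | cons p t =>
      simp only [get_extremes_points, get_extremes_points_alt, List.foldl_cons,
        min?_eq_foldl, max?_eq_foldl]
      have h0 : stepA (none, none, none, none, none, none, none, none) p
          = (some p.1, some p.1, some p.2, some p.2, some p, some p, some p, some p) := rfl
      rw [h0, fold_some t p p p p]
      rfl
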